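-- pv_equiv track=rewrite | github.com/wsharvey/Dice-Game | hog.py | piggy_points
-- ===== SOURCE A (Python) =====
-- def piggy_points(score):
--     """Return the points scored from rolling 0 dice.
--
--     score:  The opponent's current score.
--     """
--     squared_score = score ** 2
--     digit = 9
--     if squared_score == 0:
--         return 3
--     else:
--         while squared_score > 0:
--             if squared_score % 10 < digit:
--                 digit = squared_score % 10
--             squared_score = squared_score // 10
--         return digit + 3
-- ===== SOURCE B (Python) =====
-- def piggy_points(score):
--     """Return the points scored from rolling 0 dice.
--
--     score:  The opponent's current score.
--     """
--     s = str(score ** 2)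
--     for d in "0123456789":
--         if d in s:
--             return int(d) + 3
-- ===== Notes on version B (the rewrite author's own statement) =====
-- stated objective: alternative
-- what changed: Instead of folding min over the digits of score**2 (A's %10//10 peeling loop), B scans the fixed candidate digits 0..9 in increasing order and returns the first one that occurs as a character of the square's decimal string; the first hit is the minimum digit, so no min accumulator and no 0 special case are needed.
import Mathlib
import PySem

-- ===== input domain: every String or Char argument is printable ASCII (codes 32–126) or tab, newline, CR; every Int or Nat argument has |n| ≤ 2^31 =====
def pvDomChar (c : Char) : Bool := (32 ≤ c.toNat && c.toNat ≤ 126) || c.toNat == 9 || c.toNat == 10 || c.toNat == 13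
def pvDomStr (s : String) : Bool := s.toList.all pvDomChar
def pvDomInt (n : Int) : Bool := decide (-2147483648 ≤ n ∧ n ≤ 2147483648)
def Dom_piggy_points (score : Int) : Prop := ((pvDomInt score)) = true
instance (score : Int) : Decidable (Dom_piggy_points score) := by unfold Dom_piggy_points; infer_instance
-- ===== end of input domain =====

-- B replaces A's %10 // 10 min-fold over the digits by a search over the candidate digits
-- 0..9, returning the first one occurring in the square's decimal string — objective: alternative.


-- ===== PORT A =====
-- A's while loop: state (squared_score, digit)
def pvLoopA (s d : Int) : Int :=
  if _h : 0 < s then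
    pvLoopA (PySem.Int.floordiv s 10)
      (if PySem.Int.mod s 10 < d then PySem.Int.mod s 10 else d)
  else d
termination_by s.toNat
decreasing_by
  have h10 : PySem.Int.floordiv s 10 = s / 10 := PySem.Int.floordiv_eq_ediv_of_pos (by omega)
  rw [h10]; omega

def piggy_points (score : Int) : Int :=
  let squared_score := score ^ 2
  if squared_score = 0 then 3
  else pvLoopA squared_score 9 + 3

-- ===== PORT B =====
-- int(c) for a decimal digit character c (exact on '0'..'9', the only chars B applies it to)
def pvDigitVal (c : Char) : Int := (c.toNat : Int) - 48

-- for d in "0123456789": if d in s: return int(d) + 3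
-- (Python's `d in s` is substring containment; for a 1-char d it is char membership, ported
-- as List.contains on the char list of str(score ** 2); the `none` branch is unreachable
-- since str of a nonnegative int always contains a decimal digit)
def piggy_points_alt (score : Int) : Int :=
  let s := PySem.Int.toChars (score ^ 2)
  match (['0','1','2','3','4','5','6','7','8','9'] : List Char).find? (fun d => s.contains d) with
  | some d => pvDigitVal d + 3
  | none => 0

-- ===== PRECONDITION & SPEC =====
def Spec_piggy_points (score : Int) (out : Int) : Prop := out = piggy_points_alt score
instance (score : Int) (out : Int) : Decidable (Spec_piggy_points score out) := by unfold Spec_piggy_points; infer_instance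

-- ===== CLAIM (what is proved, stated in full; the proofs are below) =====
def Claim_equal_piggy_points : Prop := ∀ (score : Int), Dom_piggy_points score → Spec_piggy_points score (piggy_points score)

-- ===== LEMMAS AND PROOFS =====

-- core's toDigitsCore produces the reversed base-10 digit characters (given enough fuel)
lemma pvToDigitsCore_eq (fuel : Nat) : ∀ (n : Nat) (ds : List Char), n < fuel →
    Nat.toDigitsCore 10 fuel n ds =
      (if n = 0 then ['0'] else ((Nat.digits 10 n).map Nat.digitChar).reverse) ++ ds := by
  induction fuel with
  | zero => intro n ds h; omega
  | succ f ih =>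
    intro n ds h
    rw [Nat.toDigitsCore]
    by_cases h0 : n / 10 = 0
    · simp only [h0, if_true]
      by_cases hn : n = 0
      · subst hn; simp [Nat.digitChar]
      · have hlt : n < 10 := by omega
        simp [hn, Nat.digits_def' (by norm_num : 1 < 10) (Nat.pos_of_ne_zero hn),
          Nat.mod_eq_of_lt hlt, h0]
    · simp only [h0, if_false]
      have hn : n ≠ 0 := by omega
      have hlt : n / 10 < f := by
        have := Nat.div_lt_self (by omega : 0 < n) (by norm_num : 1 < 10); omega
      rw [ih (n / 10) _ hlt]
      simp [h0, hn, Nat.digits_def' (by norm_num : 1 < 10) (Nat.pos_of_ne_zero hn)]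

lemma pvToChars_eq (m : Nat) :
    PySem.Int.toChars (m : Int) =
      (if m = 0 then ['0'] else ((Nat.digits 10 m).map Nat.digitChar).reverse) := by
  have hneg : ¬ ((m : Int) < 0) := by omega
  rw [PySem.Int.toChars, if_neg hneg, Int.toNat_natCast, Nat.toDigits,
    pvToDigitsCore_eq (m + 1) m [] (by omega), List.append_nil]

lemma pvDigitVal_digitChar (d : Nat) (hd : d < 10) : pvDigitVal (Nat.digitChar d) = (d : Int) := by
  interval_cases d <;> decide

lemma pvDigitChar_inj (j k : Nat) (hj : j < 10) (hk : k < 10)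
    (h : Nat.digitChar j = Nat.digitChar k) : j = k := by
  interval_cases j <;> interval_cases k <;> simp_all <;> exact absurd h (by decide)

lemma pvIf_min (x d : Int) : (if x < d then x else d) = min d x := by
  rcases lt_or_ge x d with h | h
  · simp [h, min_eq_right (le_of_lt h)]
  · simp [not_lt.mpr h, min_eq_left h]

-- A's loop folds min over the base-10 digits (least significant first)
lemma pvLoopA_eq (k : Nat) : ∀ (s d : Int), s.toNat = k → 0 < s →
    pvLoopA s d = ((Nat.digits 10 s.toNat).map (Nat.cast : Nat → Int)).foldl min d := by
  induction k using Nat.strong_induction_on with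
  | _ k ih =>
    intro s d hk hs
    have hmod : PySem.Int.mod s 10 = s % 10 := PySem.Int.mod_eq_emod_of_pos (by norm_num)
    have hdiv : PySem.Int.floordiv s 10 = s / 10 := PySem.Int.floordiv_eq_ediv_of_pos (by norm_num)
    have hsn : 0 < s.toNat := by omega
    have hmodc : s % 10 = ((s.toNat % 10 : Nat) : Int) := by omega
    have hdivc : (s / 10).toNat = s.toNat / 10 := by omega
    rw [pvLoopA, dif_pos hs, hmod, hdiv,
      Nat.digits_def' (by norm_num : 1 < 10) hsn, List.map_cons, List.foldl_cons,
      pvIf_min, hmodc]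
    by_cases hq : 0 < s / 10
    · rw [ih (s / 10).toNat (by omega) (s / 10) _ rfl hq, hdivc]
    · have h0 : s / 10 = 0 := by omega
      have h0n : s.toNat / 10 = 0 := by omega
      rw [h0, h0n, pvLoopA]
      simp

lemma pvFoldl_min_le_init (L : List Int) : ∀ (a : Int), L.foldl min a ≤ a := by
  induction L with
  | nil => intro a; simp
  | cons b u ihu => intro a; exact le_trans (ihu (min a b)) (min_le_left _ _)

lemma pvFoldl_min_le (L : List Int) : ∀ (a y : Int), y ∈ L → L.foldl min a ≤ y := by
  induction L with
  | nil => intro a y hy; simp at hy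
  | cons x t ih =>
    intro a y hy
    rcases List.mem_cons.mp hy with h | h
    · calc (x :: t).foldl min a = t.foldl min (min a x) := by simp
        _ ≤ min a x := pvFoldl_min_le_init t (min a x)
        _ ≤ y := h ▸ min_le_right a x
    · simpa using ih (min a x) y h

lemma pvFoldl_min_mem (L : List Int) : ∀ (a : Int), L.foldl min a = a ∨ L.foldl min a ∈ L := by
  induction L with
  | nil => intro a; left; rfl
  | cons x t ih =>
    intro a
    simp only [List.foldl_cons]
    rcases ih (min a x) with h | h
    · rw [h]
      rcases min_cases a x with ⟨h1, _⟩ | ⟨h1, _⟩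
      · left; exact h1
      · right; rw [h1]; exact List.mem_cons_self
    · right; exact List.mem_cons_of_mem x h

-- first k in range 10 satisfying q is found by find?
lemma pvFind?_range10 (q : Nat → Bool) (k : Nat) (hk : k < 10) (hq : q k = true)
    (hmin : ∀ j, j < k → q j = false) : (List.range 10).find? q = some k := by
  have h : List.range 10 = [0,1,2,3,4,5,6,7,8,9] := rfl
  rw [h]
  interval_cases k <;>
    simp [hq, hmin 0, hmin 1, hmin 2, hmin 3, hmin 4, hmin 5, hmin 6,
      hmin 7, hmin 8]

-- ===== VERDICT (by name: the statement is the Claim_ definition above) =====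
theorem piggy_points_spec : Claim_equal_piggy_points := by
  intro score _
  unfold Spec_piggy_points piggy_points piggy_points_alt
  simp only []
  have hnn : 0 ≤ score ^ 2 := sq_nonneg score
  have hcast : score ^ 2 = (((score ^ 2).toNat : Nat) : Int) := by omega
  set m := (score ^ 2).toNat with hm
  have hcand : (['0','1','2','3','4','5','6','7','8','9'] : List Char)
      = (List.range 10).map Nat.digitChar := by decide
  by_cases h0 : score ^ 2 = 0
  · rw [if_pos h0, h0, hcand]
    decide
  · rw [if_neg h0]
    have hpos : 0 < score ^ 2 := lt_of_le_of_ne hnn (Ne.symm h0)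
    have hm0 : m ≠ 0 := by omega
    set D := Nat.digits 10 m with hD
    have hDne : D ≠ [] := by simp [hD, Nat.digits_ne_nil_iff_ne_zero, hm0]
    set L := D.map (Nat.cast : Nat → Int) with hL
    have hAL : pvLoopA (score ^ 2) 9 = L.foldl min 9 :=
      pvLoopA_eq (score ^ 2).toNat (score ^ 2) 9 rfl hpos
    have hbound : ∀ y ∈ L, 0 ≤ y ∧ y ≤ 9 := by
      intro y hy
      obtain ⟨d, hd, rfl⟩ := List.mem_map.mp hy
      have := Nat.digits_lt_base (by norm_num) (hD ▸ hd)
      omega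
    -- the min μ of A's fold is an element of L
    set μ := L.foldl min 9 with hμ
    have hμle : ∀ y ∈ L, μ ≤ y := fun y hy => pvFoldl_min_le L 9 y hy
    have hμmem : μ ∈ L := by
      rcases pvFoldl_min_mem L 9 with h | h
      · obtain ⟨y, hy⟩ := List.exists_mem_of_ne_nil L (by simp [hL, hDne])
        have hμ9 : μ = 9 := h
        have h9 : y = μ := le_antisymm (by rw [hμ9]; exact (hbound y hy).2) (hμle y hy)
        exact h9 ▸ hy
      · exact h
    obtain ⟨kd, hkdD, hkdμ⟩ := List.mem_map.mp hμmem
    have hkd10 : kd < 10 := Nat.digits_lt_base (by norm_num) (hD ▸ hkdD)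
    -- B's membership predicate over Nat candidates
    have hchars : PySem.Int.toChars (score ^ 2) = (D.map Nat.digitChar).reverse := by
      rw [hcast, pvToChars_eq, if_neg hm0]
    have hcontains : ∀ j, j < 10 →
        ((PySem.Int.toChars (score ^ 2)).contains (Nat.digitChar j) = true ↔ j ∈ D) := by
      intro j hj
      rw [hchars]
      simp only [List.contains_eq_mem, decide_eq_true_eq, List.mem_reverse, List.mem_map]
      constructor
      · rintro ⟨d, hd, hdj⟩
        have := pvDigitChar_inj d j (Nat.digits_lt_base (by norm_num) (hD ▸ hd)) hj hdj
        rwa [← this]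
      · intro hjD; exact ⟨j, hjD, rfl⟩
    have hfind : ((List.range 10).map Nat.digitChar).find?
        (fun d => (PySem.Int.toChars (score ^ 2)).contains d) = some (Nat.digitChar kd) := by
      rw [List.find?_map]
      rw [pvFind?_range10 _ kd hkd10]
      · rfl
      · exact (hcontains kd hkd10).mpr hkdD
      · intro j hjk
        by_contra hc
        have hj10 : j < 10 := by omega
        have hjD : j ∈ D := (hcontains j hj10).mp (by
          cases hcb : ((PySem.Int.toChars (score ^ 2)).contains (Nat.digitChar j)) with
          | false => exact absurd hcb hc
          | true => rfl)
        have : μ ≤ (j : Int) := hμle _ (List.mem_map.mpr ⟨j, hjD, rfl⟩)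
        omega
    rw [hcand, hfind, hAL]
    show μ + 3 = pvDigitVal (Nat.digitChar kd) + 3
    rw [pvDigitVal_digitChar kd hkd10, hkdμ]
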